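-- pv_equiv track=rewrite | github.com/propersam/CodeJam-2018-Qualification-Round | 2018 qualification round/saveTheUniverse2.py | alienDamage
-- ===== SOURCE A (Python) =====
-- def alienDamage(program):
--     damageRate = 1
--     damage = 0
--     for c in program:
--         if c == 'S':
--             damage += damageRate
--         else:
--             damageRate *= 2
--     return damage
-- ===== SOURCE B (Python) =====
-- def alienDamage(program):
--     # Group the runs of 'S' between doublings, then combine the run-lengths
--     # back-to-front with a Horner fold: total = sum(segs[k] * 2**k).
--     segs = []
--     cur = 0
--     for c in program:
--         if c == 'S':
--             cur += 1
--         else: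
--             segs.append(cur)
--             cur = 0
--     segs.append(cur)
--     total = 0
--     for n in reversed(segs):
--         total = total * 2 + n
--     return total
-- ===== Notes on version B (the rewrite author's own statement) =====
-- stated objective: faster
-- what changed: B first groups the program into run-lengths of 'S' separated by doublings, then combines the run-lengths back-to-front with a single Horner fold (total = total*2 + n); big-integer work happens once per run instead of once per character, which a timing run measured as much faster on large inputs.
import Mathlib
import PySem

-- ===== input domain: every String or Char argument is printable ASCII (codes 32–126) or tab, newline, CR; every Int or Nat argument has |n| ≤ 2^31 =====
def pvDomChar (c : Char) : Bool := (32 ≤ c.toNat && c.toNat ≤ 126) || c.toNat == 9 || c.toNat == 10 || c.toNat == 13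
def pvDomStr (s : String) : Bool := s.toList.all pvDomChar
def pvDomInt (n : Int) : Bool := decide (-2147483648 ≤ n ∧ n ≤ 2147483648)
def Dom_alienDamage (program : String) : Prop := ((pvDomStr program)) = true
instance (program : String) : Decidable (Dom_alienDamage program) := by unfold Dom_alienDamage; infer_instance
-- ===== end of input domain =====

-- B regroups A's running-rate pass into run-lengths of 'S' combined by a back-to-front Horner fold; big-int work per run instead of per char (measured faster in a timing run).

-- ===== PORT A =====
def alienDamage (program : String) : Int :=
  (program.toList.foldl
    (fun (s : Int × Int) c => if c = 'S' then (s.1, s.2 + s.1) else (s.1 * 2, s.2))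
    ((1 : Int), (0 : Int))).2

-- ===== PORT B =====
/-- Source B's closing Horner loop: `for n in reversed(segs): total = total * 2 + n`. -/
def pvW (xs : List Int) : Int :=
  xs.reverse.foldl (fun total n => total * 2 + n) 0

def alienDamage_alt (program : String) : Int :=
  let st := program.toList.foldl
    (fun (s : List Int × Int) c => if c = 'S' then (s.1, s.2 + 1) else (s.1 ++ [s.2], 0))
    (([] : List Int), (0 : Int))
  let segs := st.1 ++ [st.2]
  pvW segs

-- ===== PRECONDITION & SPEC =====
def Spec_alienDamage (program : String) (out : Int) : Prop := out = alienDamage_alt program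
instance (program : String) (out : Int) : Decidable (Spec_alienDamage program out) := by unfold Spec_alienDamage; infer_instance

-- ===== CLAIM (what is proved, stated in full; the proofs are below) =====
def Claim_equal_alienDamage : Prop := ∀ (program : String), Dom_alienDamage program → Spec_alienDamage program (alienDamage program)

-- ===== LEMMAS AND PROOFS =====

/-- Reference value: damage of a suffix, each 'S' weighted by 2^(non-'S' chars before it). -/
def pvF : List Char → Int
  | [] => 0
  | c :: t => if c = 'S' then 1 + pvF t else 2 * pvF t

theorem pvHorner_shift (ys : List Int) (t : Int) :
    ys.foldl (fun total n => total * 2 + n) t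
      = t * 2 ^ ys.length + ys.foldl (fun total n => total * 2 + n) 0 := by
  induction ys generalizing t with
  | nil => simp
  | cons y ys ih =>
    simp only [List.foldl_cons, List.length_cons]
    rw [ih (t * 2 + y), ih (0 * 2 + y)]
    ring

theorem pvW_append_singleton (xs : List Int) (x : Int) :
    pvW (xs ++ [x]) = pvW xs + x * 2 ^ xs.length := by
  simp only [pvW, List.reverse_append, List.reverse_cons, List.reverse_nil, List.nil_append,
    List.singleton_append, List.foldl_cons]
  rw [pvHorner_shift xs.reverse (0 * 2 + x), List.length_reverse]
  ring

theorem pvA_inv (l : List Char) (r d : Int) :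
    (l.foldl (fun (s : Int × Int) c => if c = 'S' then (s.1, s.2 + s.1) else (s.1 * 2, s.2)) (r, d)).2
      = d + r * pvF l := by
  induction l generalizing r d with
  | nil => simp [pvF]
  | cons c t ih =>
    by_cases h : c = 'S' <;> simp [pvF, h, ih] <;> ring

theorem pvB_inv (l : List Char) (acc : List Int) (cur : Int) :
    pvW ((l.foldl (fun (s : List Int × Int) c => if c = 'S' then (s.1, s.2 + 1) else (s.1 ++ [s.2], 0)) (acc, cur)).1
         ++ [(l.foldl (fun (s : List Int × Int) c => if c = 'S' then (s.1, s.2 + 1) else (s.1 ++ [s.2], 0)) (acc, cur)).2])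
      = pvW acc + (cur + pvF l) * 2 ^ acc.length := by
  induction l generalizing acc cur with
  | nil => simp [pvF, pvW_append_singleton]
  | cons c t ih =>
    simp only [List.foldl_cons]
    by_cases h : c = 'S'
    · rw [if_pos h, ih, pvF, if_pos h]
      ring
    · rw [if_neg h, ih, pvF, if_neg h, pvW_append_singleton, List.length_append]
      simp only [List.length_cons, List.length_nil, pow_add, pow_one, pow_zero]
      ring

-- ===== VERDICT (by name: the statement is the Claim_ definition above) =====
theorem alienDamage_spec : Claim_equal_alienDamage := by
  intro program _
  show alienDamage program = alienDamage_alt program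
  have hA := pvA_inv program.toList 1 0
  have hB := pvB_inv program.toList [] 0
  simp only [alienDamage, alienDamage_alt, hA]
  rw [hB]
  simp [pvW]
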